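-- pv_equiv track=rewrite | github.com/raeez/chiral-bar-cobar | compute/lib/bar_comparison_engine.py | bar_com_dim
-- ===== SOURCE A (Python) =====
-- def bar_com_dim(n: int, d: int) -> int:
--     r"""Dimension of the arity-n Harrison complex B_{Com,n}(A).
--
--     B_{Com,n}(A) = Lie^c(n) \otimes_{S_n} (s^{-1} Abar)^{\otimes n}
--
--     For d generators:
--       dim = dim(Lie^c(n) otimes_{S_n} V^{otimes n})
--
--     When n <= d, this equals stirling1_unsigned(n, 1) * binom(d, n) * ...
--
--     Actually, the correct formula is:
--       dim(Lie(n) otimes_{S_n} V^{otimes n}) for dim V = d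
--
--     This is the dimension of the free Lie algebra on d generators at bracket length n.
--     By the Witt formula (necklace polynomial):
--       dim = (1/n) * sum_{k|n} mu(n/k) * d^k
--
--     This is the number of Lyndon words of length n in d letters,
--     which equals the dimension of the degree-n component of the free Lie algebra.
--
--     Multi-path verification:
--       Path 1: Witt formula = (1/n) sum_{k|n} mu(n/k) d^k
--       Path 2: Dimension of Free_Lie(d)_n (Lyndon words)
--       Path 3: For d=1: dim = 1 if n=1, 0 if n >= 2 (abelian)
--       Path 4: Poincaré series: sum_n dim * t^n = -sum_{k>=1} (1/k) log(1 - d*t^k)...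
--               Actually: dim = (1/n) sum_{k|n} mu(n/k) d^k (Witt/necklace formula)
--     """
--     if n <= 0 or d <= 0:
--         return 0
--     # Witt formula: W(n,d) = (1/n) * sum_{k|n} mu(n/k) * d^k
--     total = 0
--     for k in range(1, n + 1):
--         if n % k == 0:
--             total += _moebius(n // k) * (d ** k)
--     assert total % n == 0, f"Witt formula: {total} not divisible by {n}"
--     return total // n
--
-- def _moebius(n: int) -> int:
--     """Möbius function mu(n)."""
--     if n == 1:
--         return 1
--     # Factor n
--     factors = []
--     m = n
--     for p in range(2, int(m ** 0.5) + 2):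
--         if m % p == 0:
--             count = 0
--             while m % p == 0:
--                 m //= p
--                 count += 1
--             if count > 1:
--                 return 0
--             factors.append(p)
--     if m > 1:
--         factors.append(m)
--     return (-1) ** len(factors)
-- ===== SOURCE B (Python) =====
-- def bar_com_dim(n: int, d: int) -> int:
--     """Witt dimension via inclusion-exclusion over the distinct prime factors of n.
--
--     Factor n once; sum (-1)^|S| * d^(n/prod(S)) over subsets S of the distinct
--     primes of n (all other Moebius terms vanish), then divide by n.
--     """
--     if n <= 0 or d <= 0:
--         return 0
--     primes = []
--     m = n
--     p = 2
--     while p * p <= m: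
--         if m % p == 0:
--             primes.append(p)
--             while m % p == 0:
--                 m //= p
--         p += 1
--     if m > 1:
--         primes.append(m)
--     return _alternating(primes, n, d) // n
--
-- def _alternating(primes, q, d):
--     if not primes:
--         return d ** q
--     return _alternating(primes[1:], q, d) - _alternating(primes[1:], q // primes[0], d)
-- ===== Notes on version B (the rewrite author's own statement) =====
-- stated objective: faster
-- what changed: B factors n once and evaluates the Witt total by an inclusion-exclusion (signed subset) sum over the distinct prime factors of n, instead of A's scan of every k = 1..n with a fresh trial-division Moebius computation for each divisor.
import Mathlib
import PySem

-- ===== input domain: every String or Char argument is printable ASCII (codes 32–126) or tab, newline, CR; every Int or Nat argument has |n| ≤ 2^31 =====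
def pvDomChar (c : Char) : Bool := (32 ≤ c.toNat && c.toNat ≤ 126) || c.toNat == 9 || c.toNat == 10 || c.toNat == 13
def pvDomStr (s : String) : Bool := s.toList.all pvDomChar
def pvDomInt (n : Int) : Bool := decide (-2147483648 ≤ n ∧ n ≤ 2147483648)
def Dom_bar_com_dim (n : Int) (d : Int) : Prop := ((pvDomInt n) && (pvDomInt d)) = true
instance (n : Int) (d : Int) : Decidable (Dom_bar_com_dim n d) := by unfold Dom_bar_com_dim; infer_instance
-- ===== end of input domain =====

-- B replaces A's per-divisor trial-division Möbius scan by one factorisation of n and an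
-- inclusion-exclusion subset sum over its distinct primes (objective: faster).


theorem int_div_lt_of_le (m p : Int) (hm : 1 ≤ m) (hp : 2 ≤ p) : m / p < m ∧ 0 ≤ m / p := by
  have h := Int.ediv_add_emod m p
  have hr1 : 0 ≤ m % p := Int.emod_nonneg m (by omega)
  have hr2 : m % p < p := Int.emod_lt_of_pos m (by omega)
  have hq : 0 ≤ m / p := Int.ediv_nonneg (by omega) (by omega)
  refine ⟨?_, hq⟩
  by_cases hq1 : 0 < m / p
  · nlinarith [mul_lt_mul_of_pos_right (show (1:Int) < p by omega) hq1]
  · have h0 : m / p = 0 := le_antisymm (by omega) hq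
    omega

-- ===== PORT A =====
-- inner 'while m % p == 0: m //= p; count += 1' of _moebius; the dite guard only makes the
-- recursion total (it holds whenever Python enters the loop body)
def pyStrip (m p count : Int) : Int × Int :=
  if h : 2 ≤ p ∧ 1 ≤ m ∧ PySem.Int.mod m p = 0 then
    pyStrip (PySem.Int.floordiv m p) p (count + 1)
  else (m, count)
  termination_by m.toNat
  decreasing_by
    rcases h with ⟨hp, hm, hmod⟩
    rw [PySem.Int.floordiv_eq_ediv_of_pos (by omega)]
    have h12 := int_div_lt_of_le m p hm hp
    omega

-- the 'for p in range(2, int(m**0.5)+2)' body of _moebius, with early return 0 on a squared factor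
def pyMoebiusLoop : List Int → Int → List Int → Int
  | [], m, factors =>
      let factors' := if 1 < m then factors ++ [m] else factors
      (-1) ^ factors'.length
  | p :: ps, m, factors =>
      if PySem.Int.mod m p = 0 then
        let r := pyStrip m p 0
        if 1 < r.2 then 0 else pyMoebiusLoop ps r.1 (factors ++ [p])
      else pyMoebiusLoop ps m factors

def pyMoebius (n : Int) : Int :=
  if n = 1 then 1
  else
    -- int(m ** 0.5) ported as Nat.sqrt: exact on the domain |n| ≤ 2^31, where the correctly
    -- rounded double sqrt truncates to the integer square root
    pyMoebiusLoop (PySem.List.pyRange 2 (((Nat.sqrt n.toNat : Int)) + 2) 1) n []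

def bar_com_dim (n : Int) (d : Int) : Int :=
  if n ≤ 0 ∨ d ≤ 0 then 0
  else
    let total := (PySem.List.pyRange 1 (n + 1) 1).foldl
      (fun total k =>
        if PySem.Int.mod n k = 0 then total + pyMoebius (PySem.Int.floordiv n k) * d ^ k.toNat
        else total) 0
    -- 'assert total % n == 0' passes by Witt's theorem and is ported as a no-op
    PySem.Int.floordiv total n

-- ===== PORT B =====
-- inner 'while m % p == 0: m //= p' of Source B; the dite guard only makes the recursion total
def altStrip (m p : Int) : Int :=
  if h : 2 ≤ p ∧ 1 ≤ m ∧ PySem.Int.mod m p = 0 then altStrip (PySem.Int.floordiv m p) p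
  else m
  termination_by m.toNat
  decreasing_by
    rcases h with ⟨hp, hm, hmod⟩
    rw [PySem.Int.floordiv_eq_ediv_of_pos (by omega)]
    have h12 := int_div_lt_of_le m p hm hp
    omega

theorem altStrip_le (m p : Int) : altStrip m p ≤ m := by
  by_cases h : 2 ≤ p ∧ 1 ≤ m ∧ PySem.Int.mod m p = 0
  · rw [altStrip, dif_pos h]
    obtain ⟨hp, hm, hmod⟩ := h
    have key : PySem.Int.floordiv m p < m := by
      rw [PySem.Int.floordiv_eq_ediv_of_pos (by omega)]
      exact (int_div_lt_of_le m p hm hp).1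
    exact le_trans (altStrip_le _ p) (le_of_lt key)
  · rw [altStrip, dif_neg h]
  termination_by m.toNat
  decreasing_by
    rw [PySem.Int.floordiv_eq_ediv_of_pos (by omega)]
    have h12 := int_div_lt_of_le m p hm hp
    omega

-- 'while p * p <= m: …' factorisation loop of Source B collecting the distinct prime factors
def altFactorLoop (m p : Int) (primes : List Int) : List Int × Int :=
  if h : p * p ≤ m ∧ 2 ≤ p then
    if PySem.Int.mod m p = 0 then
      altFactorLoop (altStrip m p) (p + 1) (primes ++ [p])
    else altFactorLoop m (p + 1) primes
  else (primes, m)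
  termination_by (m.toNat + 1) - p.toNat
  decreasing_by
  · rcases h with ⟨hpm, hp⟩
    have h1 : altStrip m p ≤ m := altStrip_le m p
    have h2 : p ≤ m := le_trans (by nlinarith) hpm
    omega
  · rcases h with ⟨hpm, hp⟩
    have h2 : p ≤ m := le_trans (by nlinarith) hpm
    omega

-- recursive signed subset sum of Source B's _alternating
def altAlternating : List Int → Int → Int → Int
  | [], q, d => d ^ q.toNat
  | p :: ps, q, d => altAlternating ps q d - altAlternating ps (PySem.Int.floordiv q p) d

def bar_com_dim_alt (n : Int) (d : Int) : Int :=
  if n ≤ 0 ∨ d ≤ 0 then 0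
  else
    let r := altFactorLoop n 2 []
    let primes := if 1 < r.2 then r.1 ++ [r.2] else r.1
    PySem.Int.floordiv (altAlternating primes n d) n

-- ===== PRECONDITION & SPEC =====
def Spec_bar_com_dim (n : Int) (d : Int) (out : Int) : Prop := out = bar_com_dim_alt n d
instance (n : Int) (d : Int) (out : Int) : Decidable (Spec_bar_com_dim n d out) := by unfold Spec_bar_com_dim; infer_instance

-- ===== CLAIM (what is proved, stated in full; the proofs are below) =====
def Claim_equal_bar_com_dim : Prop := ∀ (n : Int) (d : Int), Dom_bar_com_dim n d → Spec_bar_com_dim n d (bar_com_dim n d)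

-- ===== LEMMAS AND PROOFS =====

-- both totals are shown equal to this common Möbius sum over the divisors of N
def wittSum (N : ℕ) (d : Int) : Int :=
  ∑ t ∈ N.divisors, (ArithmeticFunction.moebius t : Int) * d ^ (N / t)

theorem pyStrip_spec (M p : ℕ) (c : Int) (hM : 1 ≤ M) (hp : 2 ≤ p) :
    ∃ (v M' : ℕ), pyStrip (M : Int) (p : Int) c = ((M' : Int), c + (v : Int)) ∧
      M = p ^ v * M' ∧ ¬ p ∣ M' ∧ 1 ≤ M' := by
  by_cases hdvd : p ∣ M
  · have hcond : 2 ≤ (p : Int) ∧ 1 ≤ (M : Int) ∧ PySem.Int.mod (M : Int) (p : Int) = 0 := by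
      refine ⟨by exact_mod_cast hp, by exact_mod_cast hM, ?_⟩
      rw [PySem.Int.mod_natCast, Nat.mod_eq_zero_of_dvd hdvd]
      simp
    rw [pyStrip, dif_pos hcond, PySem.Int.floordiv_natCast]
    have hM' : 1 ≤ M / p := (Nat.one_le_div_iff (by omega)).mpr (Nat.le_of_dvd (by omega) hdvd)
    obtain ⟨v, M', h1, h2, h3, h4⟩ := pyStrip_spec (M / p) p (c + 1) hM' hp
    refine ⟨v + 1, M', ?_, ?_, h3, h4⟩
    · rw [h1]; congr 1; push_cast; ring
    · have : p * (M / p) = M := Nat.mul_div_cancel' hdvd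
      calc M = p * (M / p) := this.symm
        _ = p * (p ^ v * M') := by rw [h2]
        _ = p ^ (v + 1) * M' := by ring
  · have hcond : ¬ (2 ≤ (p : Int) ∧ 1 ≤ (M : Int) ∧ PySem.Int.mod (M : Int) (p : Int) = 0) := by
      rintro ⟨-, -, hmod⟩
      rw [PySem.Int.mod_natCast] at hmod
      exact hdvd (Nat.dvd_iff_mod_eq_zero.mpr (by exact_mod_cast hmod))
    rw [pyStrip, dif_neg hcond]
    exact ⟨0, M, by simp, by simp, hdvd, hM⟩
  termination_by M
  decreasing_by exact Nat.div_lt_self (by omega) (by omega)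

theorem altStrip_spec (M p : ℕ) (hM : 1 ≤ M) (hp : 2 ≤ p) :
    ∃ (v M' : ℕ), altStrip (M : Int) (p : Int) = (M' : Int) ∧
      M = p ^ v * M' ∧ ¬ p ∣ M' ∧ 1 ≤ M' := by
  by_cases hdvd : p ∣ M
  · have hcond : 2 ≤ (p : Int) ∧ 1 ≤ (M : Int) ∧ PySem.Int.mod (M : Int) (p : Int) = 0 := by
      refine ⟨by exact_mod_cast hp, by exact_mod_cast hM, ?_⟩
      rw [PySem.Int.mod_natCast, Nat.mod_eq_zero_of_dvd hdvd]
      simp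
    rw [altStrip, dif_pos hcond, PySem.Int.floordiv_natCast]
    have hM' : 1 ≤ M / p := (Nat.one_le_div_iff (by omega)).mpr (Nat.le_of_dvd (by omega) hdvd)
    obtain ⟨v, M', h1, h2, h3, h4⟩ := altStrip_spec (M / p) p hM' hp
    refine ⟨v + 1, M', h1, ?_, h3, h4⟩
    have : p * (M / p) = M := Nat.mul_div_cancel' hdvd
    calc M = p * (M / p) := this.symm
      _ = p * (p ^ v * M') := by rw [h2]
      _ = p ^ (v + 1) * M' := by ring
  · have hcond : ¬ (2 ≤ (p : Int) ∧ 1 ≤ (M : Int) ∧ PySem.Int.mod (M : Int) (p : Int) = 0) := by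
      rintro ⟨-, -, hmod⟩
      rw [PySem.Int.mod_natCast] at hmod
      exact hdvd (Nat.dvd_iff_mod_eq_zero.mpr (by exact_mod_cast hmod))
    rw [altStrip, dif_neg hcond]
    exact ⟨0, M, rfl, by simp, hdvd, hM⟩
  termination_by M
  decreasing_by exact Nat.div_lt_self (by omega) (by omega)

theorem pyMoebiusLoop_spec (a e : Int) (M : ℕ) (f : List Int) (ha : 2 ≤ a) (he : 0 ≤ e)
    (hM : 1 ≤ M) (hMe : (M : Int) < e * e)
    (hfac : ∀ q : ℕ, q.Prime → q ∣ M → a ≤ (q : Int)) :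
    pyMoebiusLoop (PySem.List.pyRange a e 1) (M : Int) f
      = (-1) ^ f.length * (ArithmeticFunction.moebius M : Int) := by
  by_cases hae : a < e
  · rw [PySem.List.pyRange_one_cons hae]
    set A : ℕ := a.toNat with hA
    have haA : a = (A : Int) := (Int.toNat_of_nonneg (by omega)).symm
    rw [haA]
    by_cases hdvd : A ∣ M
    · have hA2 : 2 ≤ A := by omega
      have hM2 : 2 ≤ M := le_trans hA2 (Nat.le_of_dvd (by omega) hdvd)
      have hAprime : A.Prime := by
        have h1 : M.minFac.Prime := Nat.minFac_prime (by omega)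
        have h2 : M.minFac ∣ M := Nat.minFac_dvd M
        have h3 := hfac M.minFac h1 h2
        have h5 : M.minFac ≤ A := Nat.minFac_le_of_dvd (by omega) hdvd
        have h6 : M.minFac = A := by omega
        rw [← h6]; exact h1
      have hmodA : PySem.Int.mod (M : Int) (A : Int) = 0 := by
        rw [PySem.Int.mod_natCast, Nat.mod_eq_zero_of_dvd hdvd]; simp
      obtain ⟨v, M', hstrip, hfact, hndvd, hM'⟩ := pyStrip_spec M A 0 hM hAprime.two_le
      have hv : 1 ≤ v := by
        rcases Nat.eq_zero_or_pos v with h0 | h1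
        · exfalso; apply hndvd; rw [hfact, h0] at hdvd; simpa using hdvd
        · exact h1
      simp only [pyMoebiusLoop]
      rw [if_pos hmodA, hstrip]
      by_cases hv2 : 1 < v
      · rw [if_pos (by push_cast; omega : (1 : Int) < ((M' : Int), 0 + (v : Int)).2)]
        have hnsq : ¬ Squarefree M := by
          intro hsq
          have hAA : A * A ∣ M := by
            rw [hfact]
            have h7 : A * A ∣ A ^ v := by
              have : A ^ 2 ∣ A ^ v := pow_dvd_pow A (by omega)
              simpa [pow_two] using this
            exact h7.mul_right M'
          exact hAprime.one_lt.ne' (Nat.isUnit_iff.mp (hsq A hAA))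
        rw [ArithmeticFunction.moebius_eq_zero_of_not_squarefree hnsq]
        simp
      · have hv1 : v = 1 := by omega
        rw [if_neg (by push_cast; omega : ¬ (1 : Int) < ((M' : Int), 0 + (v : Int)).2)]
        have hM'le : (M' : Int) < e * e := by
          have h8 : M' ≤ M := by
            rw [hfact]; exact Nat.le_mul_of_pos_left M' (pow_pos (by omega) v)
          have h9 : (M' : Int) ≤ (M : Int) := by exact_mod_cast h8
          omega
        have hrec := pyMoebiusLoop_spec ((A : Int) + 1) e M' (f ++ [(A : Int)]) (by omega) he
          hM' hM'le
          (fun q hq hqd => by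
            have hqM : q ∣ M := by rw [hfact]; exact hqd.mul_left _
            have h1 := hfac q hq hqM
            have hne : q ≠ A := by rintro rfl; exact hndvd hqd
            have h10 : (q : Int) ≠ (A : Int) := by exact_mod_cast hne
            omega)
        rw [hrec]
        have hcop : A.Coprime M' := (Nat.Prime.coprime_iff_not_dvd hAprime).mpr hndvd
        have hmul : ArithmeticFunction.moebius M
            = ArithmeticFunction.moebius A * ArithmeticFunction.moebius M' := by
          rw [hfact, hv1, pow_one]
          exact ArithmeticFunction.isMultiplicative_moebius.map_mul_of_coprime hcop
        rw [hmul, ArithmeticFunction.moebius_apply_prime hAprime]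
        rw [List.length_append, List.length_singleton]
        push_cast
        ring
    · have hmodA : ¬ PySem.Int.mod (M : Int) (A : Int) = 0 := by
        rw [PySem.Int.mod_natCast]
        intro h
        exact hdvd (Nat.dvd_iff_mod_eq_zero.mpr (by exact_mod_cast h))
      simp only [pyMoebiusLoop]
      rw [if_neg hmodA]
      exact pyMoebiusLoop_spec ((A : Int) + 1) e M f (by omega) he hM hMe
        (fun q hq hqd => by
          have h1 := hfac q hq hqd
          have hne : q ≠ A := by rintro rfl; exact hdvd hqd
          have h10 : (q : Int) ≠ (A : Int) := by exact_mod_cast hne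
          omega)
  · rw [PySem.List.pyRange_one_eq_nil (by omega)]
    by_cases hM1 : M = 1
    · subst hM1
      simp only [pyMoebiusLoop]
      rw [if_neg (by norm_num)]
      simp [ArithmeticFunction.moebius_apply_one]
    · have hM2 : 2 ≤ M := by omega
      have hMprime : M.Prime := by
        by_contra hnp
        have h1 : M.minFac.Prime := Nat.minFac_prime hM1
        have h2 := hfac M.minFac h1 (Nat.minFac_dvd M)
        have h3 : Nat.minFac M ^ 2 ≤ M := Nat.minFac_sq_le_self (by omega) hnp
        have h4 : (M : Int) < (M.minFac : Int) * (M.minFac : Int) := by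
          have he' : e ≤ (M.minFac : Int) := by omega
          nlinarith
        have h5 : ((M.minFac ^ 2 : ℕ) : Int) ≤ (M : Int) := by exact_mod_cast h3
        push_cast at h5
        nlinarith
      simp only [pyMoebiusLoop]
      rw [if_pos (by exact_mod_cast hM2 : (1 : Int) < (M : Int))]
      rw [ArithmeticFunction.moebius_apply_prime hMprime]
      simp [List.length_append]
      ring
  termination_by (e - a).toNat
  decreasing_by all_goals omega

theorem pyMoebius_eq (M : ℕ) (hM : 1 ≤ M) :
    pyMoebius (M : Int) = (ArithmeticFunction.moebius M : Int) := by
  by_cases hM1 : M = 1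
  · subst hM1; simp [pyMoebius, ArithmeticFunction.moebius_apply_one]
  · have hM2 : 2 ≤ M := by omega
    rw [pyMoebius, if_neg (by exact_mod_cast hM1 : ¬ (M : Int) = 1)]
    rw [Int.toNat_natCast]
    have h := pyMoebiusLoop_spec 2 ((Nat.sqrt M : Int) + 2) M [] (by omega) (by positivity)
      hM ?_ (fun q hq _ => by exact_mod_cast hq.two_le)
    · simpa using h
    · have h1 : M < (Nat.sqrt M + 1) * (Nat.sqrt M + 1) := Nat.lt_succ_sqrt M
      have h2 : M < (Nat.sqrt M + 2) * (Nat.sqrt M + 2) := by nlinarith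
      have := (Nat.cast_lt (α := Int)).mpr h2
      push_cast at this ⊢
      nlinarith [this]

theorem divisors_eq_filter (N : ℕ) (hN : 1 ≤ N) :
    N.divisors = {k ∈ Finset.Icc 1 N | k ∣ N} := by
  ext x
  simp only [Nat.mem_divisors, Finset.mem_filter, Finset.mem_Icc]
  constructor
  · rintro ⟨hd, -⟩
    exact ⟨⟨Nat.pos_of_dvd_of_pos hd (by omega), Nat.le_of_dvd (by omega) hd⟩, hd⟩
  · rintro ⟨-, hd⟩
    exact ⟨hd, by omega⟩

theorem foldA_Icc (N : ℕ) (d : Int) (j : ℕ) :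
    ((PySem.List.pyRange 1 ((j : Int) + 1)).foldl
      (fun total k =>
        if PySem.Int.mod (N : Int) k = 0 then
          total + pyMoebius (PySem.Int.floordiv (N : Int) k) * d ^ k.toNat
        else total) 0)
      = ∑ k ∈ Finset.Icc 1 j,
          (if N % k = 0 then pyMoebius ((N / k : ℕ) : Int) * d ^ k else 0) := by
  induction j with
  | zero =>
      rw [show ((0 : ℕ) : Int) + 1 = 1 by norm_num, PySem.List.pyRange_one_eq_nil (le_refl 1)]
      simp
  | succ j ih =>
      have hsplit : PySem.List.pyRange 1 (((j + 1 : ℕ) : Int) + 1)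
          = PySem.List.pyRange 1 ((j : Int) + 1) ++ [(j : Int) + 1] := by
        have hc : ((j + 1 : ℕ) : Int) + 1 = ((j : Int) + 1) + 1 := by push_cast; ring
        rw [hc]
        exact PySem.List.pyRange_one_succ_right (by omega)
      rw [hsplit, List.foldl_append, ih, List.foldl_cons, List.foldl_nil]
      have hcast : (j : Int) + 1 = ((j + 1 : ℕ) : Int) := by push_cast; ring
      rw [hcast, PySem.Int.mod_natCast, PySem.Int.floordiv_natCast, Int.toNat_natCast]
      rw [Finset.sum_Icc_succ_top (by omega : 1 ≤ j + 1)]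
      by_cases hd : N % (j + 1) = 0
      · rw [if_pos (by exact_mod_cast hd), if_pos hd]
      · rw [if_neg (by exact_mod_cast hd), if_neg hd, add_zero]

theorem totalA_eq (N : ℕ) (d : Int) (hN : 1 ≤ N) :
    ((PySem.List.pyRange 1 ((N : Int) + 1)).foldl
      (fun total k =>
        if PySem.Int.mod (N : Int) k = 0 then
          total + pyMoebius (PySem.Int.floordiv (N : Int) k) * d ^ k.toNat
        else total) 0) = wittSum N d := by
  rw [foldA_Icc N d N]
  have h1 : ∑ k ∈ Finset.Icc 1 N,
      (if N % k = 0 then pyMoebius ((N / k : ℕ) : Int) * d ^ k else 0)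
      = ∑ k ∈ N.divisors, pyMoebius ((N / k : ℕ) : Int) * d ^ k := by
    rw [divisors_eq_filter N hN, Finset.sum_filter]
    refine Finset.sum_congr rfl (fun k hk => ?_)
    rw [Finset.mem_Icc] at hk
    by_cases hd : k ∣ N
    · rw [if_pos (Nat.mod_eq_zero_of_dvd hd), if_pos hd]
    · rw [if_neg hd, if_neg (fun h => hd (Nat.dvd_iff_mod_eq_zero.mpr h))]
  rw [h1]
  have h2 : ∑ k ∈ N.divisors, pyMoebius ((N / k : ℕ) : Int) * d ^ k
      = ∑ k ∈ N.divisors, (ArithmeticFunction.moebius (N / k) : Int) * d ^ (N / (N / k)) := by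
    refine Finset.sum_congr rfl (fun k hk => ?_)
    rw [Nat.mem_divisors] at hk
    have hk1 : 1 ≤ k := Nat.pos_of_dvd_of_pos hk.1 (by omega)
    have hdiv : 1 ≤ N / k := (Nat.one_le_div_iff (by omega)).mpr (Nat.le_of_dvd (by omega) hk.1)
    rw [pyMoebius_eq _ hdiv, Nat.div_div_self hk.1 (by omega)]
  rw [h2]
  exact Nat.sum_div_divisors N (fun t => (ArithmeticFunction.moebius t : Int) * d ^ (N / t))

theorem altFactorLoop_spec (M p : ℕ) (acc : List Int) (hp : 2 ≤ p) (hM : 1 ≤ M)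
    (hfac : ∀ q : ℕ, q.Prime → q ∣ M → p ≤ q) :
    ∃ (L : List ℕ) (Mr : ℕ),
      altFactorLoop (M : Int) (p : Int) acc = (acc ++ L.map (fun x : ℕ => (x : Int)), (Mr : Int)) ∧
      (∀ x ∈ L, x.Prime ∧ p ≤ x ∧ ¬ x ∣ Mr) ∧ L.Nodup ∧ 1 ≤ Mr ∧ Mr ∣ M ∧
      (Mr = 1 ∨ Mr.Prime) ∧ L.toFinset ∪ Mr.primeFactors = M.primeFactors := by
  by_cases hloop : p * p ≤ M
  · have hcond : (p : Int) * (p : Int) ≤ (M : Int) ∧ 2 ≤ (p : Int) := by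
      constructor
      · exact_mod_cast hloop
      · exact_mod_cast hp
    rw [altFactorLoop, dif_pos hcond]
    have hpM : p ≤ M := le_trans (Nat.le_mul_of_pos_left p (by omega)) hloop
    by_cases hdvd : p ∣ M
    · have hpprime : p.Prime := by
        have h1 : p.minFac.Prime := Nat.minFac_prime (by omega)
        have h2 : p.minFac ∣ M := dvd_trans (Nat.minFac_dvd p) hdvd
        have h3 := hfac p.minFac h1 h2
        have h4 : p.minFac ≤ p := Nat.minFac_le (by omega)
        have h5 : p.minFac = p := by omega
        rw [← h5]; exact h1
      have hmod : PySem.Int.mod (M : Int) (p : Int) = 0 := by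
        rw [PySem.Int.mod_natCast, Nat.mod_eq_zero_of_dvd hdvd]; simp
      rw [if_pos hmod]
      obtain ⟨v, M', hstrip, hfact, hndvd, hM'1⟩ := altStrip_spec M p hM hp
      have hv : 1 ≤ v := by
        rcases Nat.eq_zero_or_pos v with h0 | h1
        · exfalso; apply hndvd; rw [hfact, h0] at hdvd; simpa using hdvd
        · exact h1
      have hM'dvd : M' ∣ M := by rw [hfact]; exact Dvd.intro_left _ rfl
      obtain ⟨L', Mr, heq, hent, hnd, hMr1, hMrdvd, hMrp, hpf⟩ :=
        altFactorLoop_spec M' (p + 1) (acc ++ [(p : Int)]) (by omega) hM'1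
          (fun q hq hqd => by
            have hqM : q ∣ M := dvd_trans hqd hM'dvd
            have h1 := hfac q hq hqM
            have hne : q ≠ p := by rintro rfl; exact hndvd hqd
            omega)
      refine ⟨p :: L', Mr, ?_, ?_, ?_, hMr1, dvd_trans hMrdvd hM'dvd, hMrp, ?_⟩
      · rw [hstrip]
        have : ((p : ℕ) : Int) + 1 = (((p + 1 : ℕ)) : Int) := by push_cast; ring
        rw [this, heq]
        simp
      · intro x hx
        rcases List.mem_cons.mp hx with hx1 | hx2
        · subst hx1
          exact ⟨hpprime, le_refl _, fun h => hndvd (dvd_trans h hMrdvd)⟩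
        · obtain ⟨h1, h2, h3⟩ := hent x hx2
          exact ⟨h1, by omega, h3⟩
      · rw [List.nodup_cons]
        refine ⟨fun hmem => ?_, hnd⟩
        obtain ⟨-, h2, -⟩ := hent p hmem
        omega
      · have hpfM : M.primeFactors = {p} ∪ M'.primeFactors := by
          rw [hfact, Nat.primeFactors_mul (by positivity) (by omega),
            Nat.primeFactors_prime_pow (by omega) hpprime]
        rw [hpfM, ← hpf, List.toFinset_cons, Finset.insert_eq, Finset.union_assoc]
    · have hmod : ¬ PySem.Int.mod (M : Int) (p : Int) = 0 := by
        rw [PySem.Int.mod_natCast]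
        intro h
        exact hdvd (Nat.dvd_iff_mod_eq_zero.mpr (by exact_mod_cast h))
      rw [if_neg hmod]
      obtain ⟨L, Mr, heq, hent, hnd, hMr1, hMrdvd, hMrp, hpf⟩ :=
        altFactorLoop_spec M (p + 1) acc (by omega) hM
          (fun q hq hqd => by
            have h1 := hfac q hq hqd
            have hne : q ≠ p := by rintro rfl; exact hdvd hqd
            omega)
      have : ((p : ℕ) : Int) + 1 = (((p + 1 : ℕ)) : Int) := by push_cast; ring
      rw [this, heq]
      refine ⟨L, Mr, rfl, ?_, hnd, hMr1, hMrdvd, hMrp, hpf⟩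
      intro x hx
      obtain ⟨h1, h2, h3⟩ := hent x hx
      exact ⟨h1, by omega, h3⟩
  · have hcond : ¬ ((p : Int) * (p : Int) ≤ (M : Int) ∧ 2 ≤ (p : Int)) := by
      rintro ⟨h1, -⟩
      exact hloop (by exact_mod_cast h1)
    rw [altFactorLoop, dif_neg hcond]
    refine ⟨[], M, by simp, by simp, by simp, hM, dvd_refl M, ?_, by simp⟩
    by_cases hM1 : M = 1
    · exact Or.inl hM1
    · right
      by_contra hnp
      have h1 : M.minFac.Prime := Nat.minFac_prime hM1
      have h2 := hfac M.minFac h1 (Nat.minFac_dvd M)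
      have h3 : Nat.minFac M ^ 2 ≤ M := Nat.minFac_sq_le_self (by omega) hnp
      have h4 : M < p * p := by omega
      nlinarith [h3, h2, h4]
  termination_by M + 1 - p
  decreasing_by
  · have hM'le : M' ≤ M := Nat.le_of_dvd (by omega) hM'dvd
    omega
  · omega

theorem sum_divisors_prime_mul {p R : ℕ} (hp : p.Prime) (hpR : ¬ p ∣ R) (hR : R ≠ 0)
    (f : ℕ → Int) :
    ∑ t ∈ (p * R).divisors, f t = ∑ t ∈ R.divisors, f t + ∑ t ∈ R.divisors, f (p * t) := by
  have hp0 : p ≠ 0 := hp.ne_zero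
  have himg : (p * R).divisors = R.divisors ∪ R.divisors.image (fun t => p * t) := by
    ext t
    simp only [Nat.mem_divisors, Finset.mem_union, Finset.mem_image]
    constructor
    · rintro ⟨htdvd, -⟩
      by_cases hpt : p ∣ t
      · right
        obtain ⟨s, rfl⟩ := hpt
        refine ⟨s, ⟨?_, hR⟩, rfl⟩
        exact (mul_dvd_mul_iff_left (by omega : p ≠ 0)).mp htdvd
      · left
        have hcop : Nat.Coprime t p := Nat.Coprime.symm ((Nat.Prime.coprime_iff_not_dvd hp).mpr hpt)
        exact ⟨Nat.Coprime.dvd_of_dvd_mul_left hcop htdvd, hR⟩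
    · rintro (⟨h, -⟩ | ⟨s, ⟨hs, -⟩, rfl⟩)
      · exact ⟨Dvd.dvd.mul_left h p, mul_ne_zero hp0 hR⟩
      · exact ⟨mul_dvd_mul_left p hs, mul_ne_zero hp0 hR⟩
  have hdisj : Disjoint R.divisors (R.divisors.image (fun t => p * t)) := by
    rw [Finset.disjoint_left]
    rintro t ht hti
    rw [Finset.mem_image] at hti
    obtain ⟨s, -, rfl⟩ := hti
    rw [Nat.mem_divisors] at ht
    exact hpR (dvd_trans (Dvd.intro s rfl) ht.1)
  rw [himg, Finset.sum_union hdisj,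
    Finset.sum_image (fun x _ y _ h => Nat.eq_of_mul_eq_mul_left (by omega) h)]

theorem altAlternating_spec (ps : List ℕ) (q : ℕ) (d : Int) (hpr : ∀ x ∈ ps, x.Prime)
    (hnd : ps.Nodup) (hdvd : ∀ x ∈ ps, x ∣ q) :
    altAlternating (ps.map (fun x : ℕ => (x : Int))) (q : Int) d
      = ∑ t ∈ ps.prod.divisors, (ArithmeticFunction.moebius t : Int) * d ^ (q / t) := by
  induction ps generalizing q with
  | nil =>
      simp [altAlternating, Nat.divisors_one, ArithmeticFunction.moebius_apply_one,
        Int.toNat_natCast]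
  | cons p rest ih =>
      have hp : p.Prime := hpr p (by simp)
      have hrestpr : ∀ x ∈ rest, x.Prime := fun x hx => hpr x (by simp [hx])
      have hrestnd : rest.Nodup := (List.nodup_cons.mp hnd).2
      have hpnotmem : p ∉ rest := (List.nodup_cons.mp hnd).1
      have hR0 : rest.prod ≠ 0 := by
        intro h
        rw [List.prod_eq_zero_iff] at h
        exact (hrestpr 0 h).ne_zero rfl
      have hpR : ¬ p ∣ rest.prod := by
        intro h
        obtain ⟨a, ha, hpa⟩ := (hp.prime.dvd_prod_iff).mp h
        have : p = a := (Nat.prime_dvd_prime_iff_eq hp (hrestpr a ha)).mp hpa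
        exact hpnotmem (this ▸ ha)
      have hpq : p ∣ q := hdvd p (by simp)
      have hrest_q : ∀ x ∈ rest, x ∣ q := fun x hx => hdvd x (by simp [hx])
      have hrest_qp : ∀ x ∈ rest, x ∣ q / p := by
        intro x hx
        have hxq : x ∣ q := hrest_q x hx
        have hxp : ¬ x ∣ p := by
          intro h
          have : x = p := ((Nat.prime_dvd_prime_iff_eq (hrestpr x hx) hp).mp h)
          exact hpnotmem (this ▸ hx)
        have hcop : Nat.Coprime x p := (Nat.Prime.coprime_iff_not_dvd (hrestpr x hx)).mpr hxp
        have hq' : q = p * (q / p) := (Nat.mul_div_cancel' hpq).symm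
        exact Nat.Coprime.dvd_of_dvd_mul_left hcop (hq' ▸ hxq)
      rw [List.map_cons]
      rw [show altAlternating ((p : Int) :: rest.map (fun x : ℕ => (x : Int))) (q : Int) d
          = altAlternating (rest.map (fun x : ℕ => (x : Int))) (q : Int) d
            - altAlternating (rest.map (fun x : ℕ => (x : Int)))
                (PySem.Int.floordiv (q : Int) (p : Int)) d from rfl]
      rw [PySem.Int.floordiv_natCast]
      rw [ih q hrestpr hrestnd hrest_q, ih (q / p) hrestpr hrestnd hrest_qp]
      rw [List.prod_cons,
        sum_divisors_prime_mul hp hpR hR0 (fun t => (ArithmeticFunction.moebius t : Int) * d ^ (q / t))]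
      have hterm : ∀ t ∈ rest.prod.divisors,
          (ArithmeticFunction.moebius (p * t) : Int) * d ^ (q / (p * t))
          = -((ArithmeticFunction.moebius t : Int) * d ^ (q / p / t)) := by
        intro t ht
        rw [Nat.mem_divisors] at ht
        have hpt : ¬ p ∣ t := fun h => hpR (dvd_trans h ht.1)
        have hcop : p.Coprime t := (Nat.Prime.coprime_iff_not_dvd hp).mpr hpt
        have : ArithmeticFunction.moebius (p * t)
            = ArithmeticFunction.moebius p * ArithmeticFunction.moebius t :=
          ArithmeticFunction.isMultiplicative_moebius.map_mul_of_coprime hcop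
        rw [this, ArithmeticFunction.moebius_apply_prime hp, Nat.div_div_eq_div_mul]
        push_cast
        ring
      rw [Finset.sum_congr rfl hterm, Finset.sum_neg_distrib]
      ring

theorem rad_sum_eq (N : ℕ) (d : Int) (hN : 1 ≤ N) :
    ∑ t ∈ (∏ p ∈ N.primeFactors, p).divisors, (ArithmeticFunction.moebius t : Int) * d ^ (N / t)
      = wittSum N d := by
  have hrad : (∏ p ∈ N.primeFactors, p) ∣ N := Nat.prod_primeFactors_dvd N
  have hsub : (∏ p ∈ N.primeFactors, p).divisors ⊆ N.divisors :=
    Nat.divisors_subset_of_dvd (by omega) hrad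
  unfold wittSum
  refine Finset.sum_subset hsub (fun t htN htrad => ?_)
  by_cases hsq : Squarefree t
  · exfalso
    have htdvd : t ∣ N := (Nat.mem_divisors.mp htN).1
    have h1 : ∏ p ∈ t.primeFactors, p = t := Nat.prod_primeFactors_of_squarefree hsq
    have h2 : t.primeFactors ⊆ N.primeFactors := Nat.primeFactors_mono htdvd (by omega)
    have h3 : t ∣ ∏ p ∈ N.primeFactors, p := by
      rw [← h1]
      exact Finset.prod_dvd_prod_of_subset _ _ _ h2
    have hrad0 : (∏ p ∈ N.primeFactors, p) ≠ 0 := ne_zero_of_dvd_ne_zero (by omega) hrad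
    exact htrad (Nat.mem_divisors.mpr ⟨h3, hrad0⟩)
  · rw [ArithmeticFunction.moebius_eq_zero_of_not_squarefree hsq]
    simp

theorem totalB_eq (N : ℕ) (d : Int) (hN : 1 ≤ N) :
    altAlternating
      (if 1 < (altFactorLoop (N : Int) 2 []).2
        then (altFactorLoop (N : Int) 2 []).1 ++ [(altFactorLoop (N : Int) 2 []).2]
        else (altFactorLoop (N : Int) 2 []).1) (N : Int) d = wittSum N d := by
  obtain ⟨L, Mr, heq, hent, hnd, hMr1, hMrdvd, hMrp, hpf⟩ :=
    altFactorLoop_spec N 2 [] (le_refl 2) hN (fun q hq _ => hq.two_le)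
  have h2 : ((2 : ℕ) : Int) = 2 := by norm_num
  rw [h2] at heq
  rw [heq]
  simp only [List.nil_append]
  set psN : List ℕ := if 1 < Mr then L ++ [Mr] else L with hpsN
  have hlist : (if 1 < (Mr : Int) then L.map (fun x : ℕ => (x : Int)) ++ [(Mr : Int)]
      else L.map (fun x : ℕ => (x : Int))) = psN.map (fun x : ℕ => (x : Int)) := by
    by_cases h : 1 < Mr
    · rw [if_pos (by exact_mod_cast h), hpsN, if_pos h]
      simp
    · rw [if_neg (by exact_mod_cast h), hpsN, if_neg h]
  rw [hlist]
  have hMrprime : 1 < Mr → Mr.Prime := by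
    intro h
    rcases hMrp with h1 | h1
    · omega
    · exact h1
  have hpsNpr : ∀ x ∈ psN, x.Prime := by
    intro x hx
    rw [hpsN] at hx
    by_cases h : 1 < Mr
    · rw [if_pos h] at hx
      rcases List.mem_append.mp hx with h2 | h2
      · exact (hent x h2).1
      · simp at h2
        exact h2 ▸ hMrprime h
    · rw [if_neg h] at hx
      exact (hent x hx).1
  have hpsNnd : psN.Nodup := by
    rw [hpsN]
    by_cases h : 1 < Mr
    · rw [if_pos h, List.nodup_append]
      refine ⟨hnd, by simp, ?_⟩
      intro a ha b hb hab
      simp only [List.mem_singleton] at hb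
      apply (hent a ha).2.2
      rw [hab, hb]
    · rw [if_neg h]; exact hnd
  have htf : psN.toFinset = N.primeFactors := by
    rw [hpsN]
    by_cases h : 1 < Mr
    · rw [if_pos h, ← hpf, (hMrprime h).primeFactors]
      simp [List.toFinset_append]
    · have hMr1' : Mr = 1 := by omega
      rw [if_neg h, ← hpf, hMr1']
      simp
  have hpsNdvd : ∀ x ∈ psN, x ∣ N := by
    intro x hx
    have : x ∈ psN.toFinset := List.mem_toFinset.mpr hx
    rw [htf] at this
    exact Nat.dvd_of_mem_primeFactors this
  rw [altAlternating_spec psN N d hpsNpr hpsNnd hpsNdvd]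
  have hprod : psN.prod = ∏ p ∈ N.primeFactors, p := by
    rw [← htf]
    rw [List.prod_toFinset (fun x => x) hpsNnd]
    simp
  rw [hprod]
  exact rad_sum_eq N d hN

-- ===== VERDICT (by name: the statement is the Claim_ definition above) =====
theorem bar_com_dim_spec : Claim_equal_bar_com_dim := by
  intro n d _
  unfold Spec_bar_com_dim bar_com_dim bar_com_dim_alt
  by_cases h : n ≤ 0 ∨ d ≤ 0
  · simp [h]
  · have hn : 1 ≤ n := by omega
    have hN : 1 ≤ n.toNat := by omega
    have hcast : ((n.toNat : Int)) = n := Int.toNat_of_nonneg (by omega)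
    simp only [if_neg h]
    rw [← hcast, totalA_eq n.toNat d hN, totalB_eq n.toNat d hN]
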